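-- pv_equiv track=rewrite | github.com/userdefault13/Aseprite-Mappie | src/tilemap_generator/map_gen_cli.py | wrap_with_water_border
-- ===== SOURCE A (Python) =====
-- WATER_CHAR = "~"
--
-- DEEP_WATER_CHAR = "`"  # Water surrounded by water (no land adjacent)
--
-- def wrap_with_water_border(grid: list[list[str]], border: int) -> list[list[str]]:
--     """Wrap content grid with water border. Returns expanded grid.
--     Ocean priority order: outermost perimeter = deep water (`), inner ring = shallow (~).
--     Min 2 tiles wide. Land (B) touches shallow water only."""
--     if border <= 0:
--         return grid
--     h = len(grid)
--     w = len(grid[0]) if grid else 0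
--     out_w = w + 2 * border
--     out_h = h + 2 * border
--     out: list[list[str]] = []
--
--     def ocean_cell(ox: int, oy: int) -> str:
--         dist = min(ox, oy, out_w - 1 - ox, out_h - 1 - oy)
--         return DEEP_WATER_CHAR if dist == 0 else WATER_CHAR
--
--     for oy in range(out_h):
--         row: list[str] = []
--         for ox in range(out_w):
--             if ox < border or ox >= out_w - border or oy < border or oy >= out_h - border:
--                 row.append(ocean_cell(ox, oy))
--             else:
--                 row.append(grid[oy - border][ox - border])
--         out.append(row)
--     return out
-- ===== SOURCE B (Python) =====
-- WATER_CHAR = "~"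
--
-- DEEP_WATER_CHAR = "`"
--
--
-- def wrap_with_water_border(grid, border):
--     """Segment-based: assemble the output row-by-row from precomputed row
--     templates instead of deciding every cell with a per-cell distance test."""
--     if border <= 0:
--         return grid
--     w = len(grid[0]) if grid else 0
--     out_w = w + 2 * border
--     deep_row = [DEEP_WATER_CHAR] * out_w
--     ring_row = [DEEP_WATER_CHAR] + [WATER_CHAR] * (out_w - 2) + [DEEP_WATER_CHAR]
--     pad = [WATER_CHAR] * (border - 1)
--     out = [deep_row] + [list(ring_row) for _ in range(border - 1)]
--     for row in grid:
--         out.append([DEEP_WATER_CHAR] + pad + row[:w] + pad + [DEEP_WATER_CHAR])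
--     out += [list(ring_row) for _ in range(border - 1)] + [list(deep_row)]
--     return out
-- ===== Notes on version B (the rewrite author's own statement) =====
-- stated objective: simpler
-- what changed: B builds the output from whole-row templates (one deep top/bottom row, replicated shallow ring rows, and per-content-row concatenation of deep/pad/content[:w]/pad/deep segments), removing A's per-cell branch and min-distance ocean_cell computation.
import Mathlib
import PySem

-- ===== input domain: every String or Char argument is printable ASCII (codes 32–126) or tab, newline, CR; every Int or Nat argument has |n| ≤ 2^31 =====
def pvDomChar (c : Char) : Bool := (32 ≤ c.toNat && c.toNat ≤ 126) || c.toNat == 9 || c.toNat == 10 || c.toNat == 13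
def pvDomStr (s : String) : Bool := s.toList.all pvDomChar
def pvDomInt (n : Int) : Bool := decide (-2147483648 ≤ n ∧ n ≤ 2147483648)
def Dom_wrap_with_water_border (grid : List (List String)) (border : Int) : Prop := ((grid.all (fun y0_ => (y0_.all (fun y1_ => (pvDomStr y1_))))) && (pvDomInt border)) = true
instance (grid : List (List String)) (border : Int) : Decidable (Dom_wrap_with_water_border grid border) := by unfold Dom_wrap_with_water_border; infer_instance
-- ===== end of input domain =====

-- B replaces A's per-cell branch + min-distance ocean test by whole-row templates
-- assembled from segments (objective: simpler). Return-value equivalence only.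

-- ===== PORT A =====
def wrap_ocean_cell (out_w out_h ox oy : Int) : String :=
  let dist := min (min ox oy) (min (out_w - 1 - ox) (out_h - 1 - oy))
  if dist = 0 then "`" else "~"

def wrap_with_water_border (grid : List (List String)) (border : Int) : List (List String) :=
  if border ≤ 0 then grid
  else
    let h : Int := grid.length
    let w : Int := if grid ≠ [] then ((PySem.List.pyGetD grid 0 []).length : Int) else 0
    let out_w := w + 2 * border
    let out_h := h + 2 * border
    (PySem.List.pyRange 0 out_h 1).foldl (fun out oy =>
      out ++ [(PySem.List.pyRange 0 out_w 1).foldl (fun row ox =>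
        if ox < border ∨ ox ≥ out_w - border ∨ oy < border ∨ oy ≥ out_h - border then
          row ++ [wrap_ocean_cell out_w out_h ox oy]
        else
          row ++ [PySem.List.pyGetD (PySem.List.pyGetD grid (oy - border) []) (ox - border) ""]) []]) []

-- ===== PORT B =====
def wrap_with_water_border_alt (grid : List (List String)) (border : Int) : List (List String) :=
  if border ≤ 0 then grid
  else
    let w : Int := if grid ≠ [] then ((PySem.List.pyGetD grid 0 []).length : Int) else 0
    let out_w := w + 2 * border
    let deep_row := List.replicate out_w.toNat "`"
    let ring_row := ["`"] ++ List.replicate (out_w - 2).toNat "~" ++ ["`"]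
    let pad := List.replicate (border - 1).toNat "~"
    let rings := List.replicate (border - 1).toNat ring_row
    [deep_row] ++ rings
      ++ grid.map (fun row => ["`"] ++ pad ++ PySem.List.slice row none (some w) ++ pad ++ ["`"])
      ++ rings ++ [deep_row]

-- ===== PRECONDITION & SPEC =====
-- Pre_ excludes exactly the ragged grids on which A raises IndexError (a content row
-- shorter than the first row, with border > 0); A returns on every other input.
def Pre_wrap_with_water_border (grid : List (List String)) (border : Int) : Prop :=
  border ≤ 0 ∨ ∀ r ∈ grid, (grid.headD []).length ≤ r.length
instance (grid : List (List String)) (border : Int) : Decidable (Pre_wrap_with_water_border grid border) := by unfold Pre_wrap_with_water_border; infer_instance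

def pvWitness_wrap_with_water_border : List (List String) × Int := ([["B", "B"], ["B", "~"]], 2)

def Spec_wrap_with_water_border (grid : List (List String)) (border : Int) (out : List (List String)) : Prop := out = wrap_with_water_border_alt grid border
instance (grid : List (List String)) (border : Int) (out : List (List String)) : Decidable (Spec_wrap_with_water_border grid border out) := by unfold Spec_wrap_with_water_border; infer_instance

-- ===== CLAIM (what is proved, stated in full; the proofs are below) =====
def Claim_equal_wrap_with_water_border : Prop := ∀ (grid : List (List String)) (border : Int), Dom_wrap_with_water_border grid border → Pre_wrap_with_water_border grid border → Spec_wrap_with_water_border grid border (wrap_with_water_border grid border)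


-- ===== LEMMAS AND PROOFS =====
theorem pv_foldl_append_ite {α β : Type} (l : List α) (p : α → Prop) [DecidablePred p] (f g : α → β) (acc : List β) :
    l.foldl (fun r x => if p x then r ++ [f x] else r ++ [g x]) acc = acc ++ l.map (fun x => if p x then f x else g x) := by
  have h : (fun (r : List β) x => if p x then r ++ [f x] else r ++ [g x]) = fun r x => r ++ [if p x then f x else g x] := by
    funext r x; split_ifs <;> rfl
  rw [h, PySem.List.foldl_append_singleton_eq_map]

theorem pv_map_const_mem {α β : Type} (l : List α) (f : α → β) (b : β) (h : ∀ x ∈ l, f x = b) :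
    l.map f = List.replicate l.length b := by
  induction l with
  | nil => simp
  | cons a t ih =>
    simp only [List.map_cons, List.length_cons, List.replicate_succ]
    rw [h a (by simp), ih (fun x hx => h x (by simp [hx]))]

theorem pv_map_pyRange_const {β : Type} (a b : Int) (g : Int → β) (s : β) (h : ∀ x, a ≤ x → x < b → g x = s) :
    (PySem.List.pyRange a b 1).map g = List.replicate (b - a).toNat s := by
  rw [pv_map_const_mem _ _ s (fun x hx => by
    rw [PySem.List.mem_pyRange_one] at hx; exact h x hx.1 hx.2)]
  rw [PySem.List.length_pyRange_one]

theorem pv_map_range_getD_take {α : Type} (xs : List α) (d : α) (n : Nat) (h : n ≤ xs.length) :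
    (List.range n).map (fun j => xs.getD j d) = xs.take n := by
  apply List.ext_getElem
  · simp [h]
  · intro k h1 h2
    simp only [List.getElem_map, List.getElem_range, List.getElem_take]
    rw [List.getD_eq_getElem xs d (by simp at h1; omega)]

theorem pv_map_range_len {α β : Type} (xs : List α) (F : α → β) (G : Nat → β)
    (h : ∀ k, (hk : k < xs.length) → G k = F xs[k]) :
    (List.range xs.length).map G = xs.map F := by
  apply List.ext_getElem
  · simp
  · intro k h1 h2
    simp only [List.getElem_map, List.getElem_range]
    exact h k (by simpa using h1)

theorem pv_pyRange_singleton' (a b : Int) (h : b = a + 1) : PySem.List.pyRange a b 1 = [a] := by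
  subst h; exact PySem.List.pyRange_one_singleton a

theorem pv_map_pyRange_split5 {β : Type} (b m : Int) (hb : 0 < b) (hm : 0 ≤ m) (g : Int → β) :
    (PySem.List.pyRange 0 (m + 2*b) 1).map g =
      [g 0] ++ (PySem.List.pyRange 1 b 1).map g ++ (PySem.List.pyRange b (b+m) 1).map g
        ++ (PySem.List.pyRange (b+m) (m+2*b-1) 1).map g ++ [g (m+2*b-1)] := by
  rw [PySem.List.pyRange_one_append 0 1 (m+2*b) (by omega) (by omega),
      PySem.List.pyRange_one_append 1 b (m+2*b) (by omega) (by omega),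
      PySem.List.pyRange_one_append b (b+m) (m+2*b) (by omega) (by omega),
      PySem.List.pyRange_one_append (b+m) (m+2*b-1) (m+2*b) (by omega) (by omega),
      pv_pyRange_singleton' 0 1 (by omega), pv_pyRange_singleton' (m+2*b-1) (m+2*b) (by omega)]
  simp

def pvCell (grid : List (List String)) (border out_w out_h oy ox : Int) : String :=
  if ox < border ∨ ox ≥ out_w - border ∨ oy < border ∨ oy ≥ out_h - border then
    wrap_ocean_cell out_w out_h ox oy
  else PySem.List.pyGetD (PySem.List.pyGetD grid (oy - border) []) (ox - border) ""

theorem pv_row_deep (grid : List (List String)) (b h w oy : Int) (hb : 0 < b) (hh : 0 ≤ h) (hw : 0 ≤ w)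
    (hoy : oy = 0 ∨ oy = h + 2*b - 1) :
    (PySem.List.pyRange 0 (w + 2*b) 1).map (pvCell grid b (w+2*b) (h+2*b) oy) =
      List.replicate (w + 2*b).toNat "`" := by
  have := pv_map_pyRange_const 0 (w+2*b) (pvCell grid b (w+2*b) (h+2*b) oy) "`" (fun x hx1 hx2 => by
    simp only [pvCell, wrap_ocean_cell]
    rw [if_pos (by omega), if_pos (by omega)])
  simpa using this

theorem pv_row_ring (grid : List (List String)) (b h w oy : Int) (hb : 0 < b) (hh : 0 ≤ h) (hw : 0 ≤ w)
    (h1 : 1 ≤ oy) (h2 : oy ≤ h + 2*b - 2) (h3 : oy < b ∨ oy ≥ h + b) :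
    (PySem.List.pyRange 0 (w + 2*b) 1).map (pvCell grid b (w+2*b) (h+2*b) oy) =
      ["`"] ++ List.replicate (w + 2*b - 2).toNat "~" ++ ["`"] := by
  rw [pv_map_pyRange_split5 b w hb hw]
  rw [pv_map_pyRange_const 1 b _ "~" (fun x hx1 hx2 => by
        simp only [pvCell, wrap_ocean_cell]
        rw [if_pos (by omega), if_neg (by omega)]),
      pv_map_pyRange_const b (b+w) _ "~" (fun x hx1 hx2 => by
        simp only [pvCell, wrap_ocean_cell]
        rw [if_pos (by omega), if_neg (by omega)]),
      pv_map_pyRange_const (b+w) (w+2*b-1) _ "~" (fun x hx1 hx2 => by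
        simp only [pvCell, wrap_ocean_cell]
        rw [if_pos (by omega), if_neg (by omega)])]
  have e0 : pvCell grid b (w+2*b) (h+2*b) oy 0 = "`" := by
    simp only [pvCell, wrap_ocean_cell]
    rw [if_pos (by omega), if_pos (by omega)]
  have e1 : pvCell grid b (w+2*b) (h+2*b) oy (w+2*b-1) = "`" := by
    simp only [pvCell, wrap_ocean_cell]
    rw [if_pos (by omega), if_pos (by omega)]
  rw [e0, e1]
  have c1 : (w+2*b-2).toNat = (b-1).toNat + ((b+w-b).toNat + ((w+2*b-1)-(b+w)).toNat) := by omega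
  rw [c1, List.replicate_add, List.replicate_add]
  simp
  omega

theorem pv_row_content (grid : List (List String)) (b : Int) (k : Nat) (hb : 0 < b)
    (hk : k < grid.length) (hw : (grid.headD []).length ≤ grid[k].length) :
    (PySem.List.pyRange 0 (((grid.headD []).length : Int) + 2*b) 1).map
        (pvCell grid b (((grid.headD []).length : Int) + 2*b) ((grid.length : Int) + 2*b) (b + (k : Int))) =
      ["`"] ++ List.replicate (b-1).toNat "~" ++ grid[k].take (grid.headD []).length
        ++ List.replicate (b-1).toNat "~" ++ ["`"] := by
  have hh : (0:Int) ≤ (grid.length : Int) := by positivity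
  have hkh : (k : Int) < (grid.length : Int) := by exact_mod_cast hk
  rw [pv_map_pyRange_split5 b ((grid.headD []).length : Int) hb (by positivity)]
  rw [pv_map_pyRange_const 1 b _ "~" (fun x hx1 hx2 => by
        simp only [pvCell, wrap_ocean_cell]
        rw [if_pos (by omega), if_neg (by omega)]),
      pv_map_pyRange_const (b + ((grid.headD []).length : Int)) (((grid.headD []).length : Int)+2*b-1) _ "~" (fun x hx1 hx2 => by
        simp only [pvCell, wrap_ocean_cell]
        rw [if_pos (by omega), if_neg (by omega)])]
  have e0 : pvCell grid b (((grid.headD []).length : Int)+2*b) ((grid.length : Int)+2*b) (b + (k:Int)) 0 = "`" := by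
    simp only [pvCell, wrap_ocean_cell]
    rw [if_pos (by omega), if_pos (by omega)]
  have e1 : pvCell grid b (((grid.headD []).length : Int)+2*b) ((grid.length : Int)+2*b) (b + (k:Int)) (((grid.headD []).length : Int)+2*b-1) = "`" := by
    simp only [pvCell, wrap_ocean_cell]
    rw [if_pos (by omega), if_pos (by omega)]
  have emid : (PySem.List.pyRange b (b + ((grid.headD []).length : Int)) 1).map
      (pvCell grid b (((grid.headD []).length : Int)+2*b) ((grid.length : Int)+2*b) (b + (k:Int))) =
      grid[k].take (grid.headD []).length := by
    rw [PySem.List.pyRange_one b (b + ((grid.headD []).length : Int))]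
    rw [List.map_map]
    have harg : (b + ((grid.headD []).length : Int) - b).toNat = (grid.headD []).length := by omega
    rw [harg]
    refine (List.map_congr_left ?_).trans (pv_map_range_getD_take grid[k] "" _ hw)
    intro j hj
    rw [List.mem_range] at hj
    simp only [Function.comp_apply, pvCell]
    rw [if_neg (by omega)]
    have h1 : b + (k:Int) - b = (k : Int) := by omega
    have h2 : b + (j:Int) - b = (j : Int) := by omega
    rw [h1, h2, PySem.List.pyGetD_natCast, PySem.List.pyGetD_natCast]
    rw [List.getD_eq_getElem grid [] hk]
  have cnt : (((grid.headD []).length : Int) + 2*b - 1 - (b + ((grid.headD []).length : Int))).toNat = (b-1).toNat := by omega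
  rw [cnt]
  rw [e0, e1, emid]

theorem pv_wif (grid : List (List String)) :
    (if grid ≠ [] then ((PySem.List.pyGetD grid 0 []).length : Int) else 0) = ((grid.headD []).length : Int) := by
  cases grid with
  | nil => simp
  | cons a t => simp [PySem.List.pyGetD_zero_cons]

theorem pv_A_eq_map (grid : List (List String)) (border : Int) (hb : 0 < border) :
    wrap_with_water_border grid border =
      (PySem.List.pyRange 0 ((grid.length : Int) + 2*border) 1).map (fun oy =>
        (PySem.List.pyRange 0 (((grid.headD []).length : Int) + 2*border) 1).map
          (pvCell grid border (((grid.headD []).length : Int) + 2*border) ((grid.length : Int) + 2*border) oy)) := by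
  unfold wrap_with_water_border
  rw [if_neg (by omega)]
  simp only [pv_wif]
  simp only [pv_foldl_append_ite, PySem.List.foldl_append_singleton_eq_map, List.nil_append]
  rfl

theorem pv_B_eq (grid : List (List String)) (border : Int) (hb : 0 < border) :
    wrap_with_water_border_alt grid border =
      [List.replicate (((grid.headD []).length : Int) + 2*border).toNat "`"]
      ++ List.replicate (border-1).toNat
           (["`"] ++ List.replicate ((((grid.headD []).length : Int) + 2*border) - 2).toNat "~" ++ ["`"])
      ++ grid.map (fun row => ["`"] ++ List.replicate (border-1).toNat "~"
            ++ row.take (grid.headD []).length ++ List.replicate (border-1).toNat "~" ++ ["`"])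
      ++ List.replicate (border-1).toNat
           (["`"] ++ List.replicate ((((grid.headD []).length : Int) + 2*border) - 2).toNat "~" ++ ["`"])
      ++ [List.replicate (((grid.headD []).length : Int) + 2*border).toNat "`"] := by
  unfold wrap_with_water_border_alt
  rw [if_neg (by omega)]
  simp only [pv_wif]
  simp only [PySem.List.slice_to _ (by positivity : (0:Int) ≤ ((grid.headD []).length : Int)), Int.toNat_natCast]

theorem pv_main (grid : List (List String)) (border : Int) (hb : 0 < border)
    (hpre : ∀ r ∈ grid, (grid.headD []).length ≤ r.length) :
    wrap_with_water_border grid border = wrap_with_water_border_alt grid border := by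
  have hh : (0:Int) ≤ (grid.length : Int) := by positivity
  have hw : (0:Int) ≤ ((grid.headD []).length : Int) := by positivity
  rw [pv_A_eq_map grid border hb, pv_B_eq grid border hb]
  rw [pv_map_pyRange_split5 border (grid.length : Int) hb hh]
  rw [pv_row_deep grid border _ _ 0 hb hh hw (Or.inl rfl)]
  rw [pv_row_deep grid border _ _ ((grid.length : Int) + 2*border - 1) hb hh hw (Or.inr rfl)]
  rw [pv_map_pyRange_const 1 border _ _ (fun oy h1 h2 =>
        pv_row_ring grid border _ _ oy hb hh hw h1 (by omega) (Or.inl h2))]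
  rw [pv_map_pyRange_const (border + (grid.length : Int)) ((grid.length : Int)+2*border-1) _ _
        (fun oy h1 h2 => pv_row_ring grid border _ _ oy hb hh hw (by omega) (by omega) (Or.inr (by omega)))]
  have hcontent : (PySem.List.pyRange border (border + (grid.length : Int)) 1).map
      (fun oy => (PySem.List.pyRange 0 (((grid.headD []).length : Int) + 2*border) 1).map
        (pvCell grid border (((grid.headD []).length : Int) + 2*border) ((grid.length : Int) + 2*border) oy)) =
      grid.map (fun row => ["`"] ++ List.replicate (border-1).toNat "~"
            ++ row.take (grid.headD []).length ++ List.replicate (border-1).toNat "~" ++ ["`"]) := by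
    rw [PySem.List.pyRange_one border (border + (grid.length : Int)), List.map_map]
    have harg : (border + (grid.length : Int) - border).toNat = grid.length := by omega
    rw [harg]
    refine pv_map_range_len grid _ _ (fun k hk => ?_)
    simp only [Function.comp_apply]
    exact pv_row_content grid border k hb hk (hpre _ (List.getElem_mem hk))
  rw [hcontent]
  have c1 : ((grid.length : Int) + 2*border - 1 - (border + (grid.length : Int))).toNat = (border - 1).toNat := by omega
  rw [c1]

-- ===== VERDICT (by name: the statement is the Claim_ definition above) =====
theorem wrap_with_water_border_spec : Claim_equal_wrap_with_water_border := by
  intro grid border _ hpre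
  unfold Spec_wrap_with_water_border
  by_cases hb : border ≤ 0
  · simp [wrap_with_water_border, wrap_with_water_border_alt, hb]
  · rcases hpre with hpre | hpre
    · omega
    · exact pv_main grid border (by omega) hpre
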